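-- pv_equiv track=rewrite | github.com/syurskyi/Python_Topics | 125_algorithms/_examples/_algorithms_challenges/pybites/intermediate/118/duplicates.py | get_duplicate_indices
-- ===== SOURCE A (Python) =====
-- def get_duplicate_indices(words):
--    """Given a list of words, loop through the words and check for each
--       word if it occurs more than once.
--       If so return the index of its first occurrence.
--       For example in the following list 'is' and 'it'
--       occur more than once, and they are at indices 0 and 1 so you would
--       return [0, 1]:
--       ['is', 'it', 'true', 'or', 'is', 'it', 'not?'] => [0, 1]
--       Make sure the returning list is unique and sorted in ascending order."""
--    duplicate_index = {}
--
--    for i in range(len(words)):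
--       for j in range(len(words)):
--          if i != j and words[i] == words[j]:
--             if words[i] not in duplicate_index:
--                duplicate_index[words[i]] = i
--
--    return [value for value in duplicate_index.values()]
-- ===== SOURCE B (Python) =====
-- def get_duplicate_indices(words):
--     counts = {}
--     for w in words:
--         counts[w] = counts.get(w, 0) + 1
--     seen = set()
--     result = []
--     for i, w in enumerate(words):
--         if counts[w] > 1 and w not in seen:
--             seen.add(w)
--             result.append(i)
--     return result
-- ===== Notes on version B (the rewrite author's own statement) =====
-- stated objective: faster
-- what changed: Replaced the O(n^2) nested pairwise index comparison with one counting pass plus one first-occurrence scan over enumerate, collecting indices directly instead of reading them back from a dict's values.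
import Mathlib
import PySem

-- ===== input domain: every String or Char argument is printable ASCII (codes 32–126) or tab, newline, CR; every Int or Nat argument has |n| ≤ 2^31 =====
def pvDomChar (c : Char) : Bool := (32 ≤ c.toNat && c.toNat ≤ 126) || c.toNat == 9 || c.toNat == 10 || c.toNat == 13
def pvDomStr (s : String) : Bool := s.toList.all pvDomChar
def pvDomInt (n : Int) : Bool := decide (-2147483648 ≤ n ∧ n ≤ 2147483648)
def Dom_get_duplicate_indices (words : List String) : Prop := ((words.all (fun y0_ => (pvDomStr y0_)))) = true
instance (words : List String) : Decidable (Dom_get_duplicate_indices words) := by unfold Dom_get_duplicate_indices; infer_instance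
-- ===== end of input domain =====

-- B replaces A's O(n^2) nested pairwise index scan with one counting pass plus one first-occurrence scan.

-- ===== PORT A =====
def get_duplicate_indices (words : List String) : List Int :=
  let d := (PySem.List.pyRange 0 (words.length : Int) 1).foldl (fun d i =>
    (PySem.List.pyRange 0 (words.length : Int) 1).foldl (fun d j =>
      if i ≠ j ∧ PySem.List.pyGetD words i "" = PySem.List.pyGetD words j "" then
        if (PySem.Dict.contains d (PySem.List.pyGetD words i "")) = false then
          PySem.Dict.insert d (PySem.List.pyGetD words i "") i
        else d
      else d) d) PySem.Dict.empty
  PySem.Dict.values d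

-- ===== PORT B =====
def get_duplicate_indices_alt (words : List String) : List Int :=
  let counts := words.foldl (fun d w => PySem.Dict.insert d w (PySem.Dict.getD d w (0 : Int) + 1)) PySem.Dict.empty
  let st := (PySem.List.enumerate words 0).foldl
    (fun (st : PySem.Set String × List Int) p =>
      if PySem.Dict.getD counts p.2 0 > 1 ∧ ¬ (PySem.Set.contains st.1 p.2 = true) then
        (PySem.Set.add st.1 p.2, st.2 ++ [p.1])
      else st)
    (PySem.Set.empty, [])
  st.2

-- ===== PRECONDITION & SPEC =====
def Spec_get_duplicate_indices (words : List String) (out : List Int) : Prop := out = get_duplicate_indices_alt words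
instance (words : List String) (out : List Int) : Decidable (Spec_get_duplicate_indices words out) := by unfold Spec_get_duplicate_indices; infer_instance

-- ===== CLAIM (what is proved, stated in full; the proofs are below) =====
def Claim_equal_get_duplicate_indices : Prop := ∀ (words : List String), Dom_get_duplicate_indices words → Spec_get_duplicate_indices words (get_duplicate_indices words)

-- ===== LEMMAS AND PROOFS =====

-- A's inner loop over j either leaves the dict alone or records (words[i], i) once.
theorem innerA (words : List String) (i : Int) (js : List Int) (d : PySem.Dict String Int) :
  js.foldl (fun d j =>
      if i ≠ j ∧ PySem.List.pyGetD words i "" = PySem.List.pyGetD words j "" then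
        if (PySem.Dict.contains d (PySem.List.pyGetD words i "")) = false then
          PySem.Dict.insert d (PySem.List.pyGetD words i "") i
        else d
      else d) d
  = if PySem.Dict.contains d (PySem.List.pyGetD words i "") = true then d
    else if js.any (fun j => decide (i ≠ j ∧ PySem.List.pyGetD words i "" = PySem.List.pyGetD words j "")) then
      PySem.Dict.insert d (PySem.List.pyGetD words i "") i
    else d := by
  induction js generalizing d with
  | nil => simp
  | cons j js ih =>
    rw [List.foldl_cons, List.any_cons]
    by_cases hc : i ≠ j ∧ PySem.List.pyGetD words i "" = PySem.List.pyGetD words j ""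
    · rw [if_pos hc]
      by_cases hd : PySem.Dict.contains d (PySem.List.pyGetD words i "") = true
      · rw [if_neg (by simp [hd]), ih, if_pos hd, if_pos hd]
      · have hd' : PySem.Dict.contains d (PySem.List.pyGetD words i "") = false :=
          Bool.eq_false_iff.mpr hd
        rw [if_pos hd', ih, if_pos (PySem.Dict.contains_insert_self _ _ _),
          if_neg hd, if_pos (by simp [hc])]
    · rw [if_neg hc, ih]
      by_cases hd : PySem.Dict.contains d (PySem.List.pyGetD words i "") = true
      · rw [if_pos hd, if_pos hd]
      · rw [if_neg hd, if_neg hd]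
        have : (decide (i ≠ j ∧ PySem.List.pyGetD words i "" = PySem.List.pyGetD words j "")) = false := by
          simp only [decide_eq_false_iff_not]; exact hc
        rw [this, Bool.false_or]

-- a word occurs more than once iff some OTHER index holds the same word
theorem count_iff (words : List String) (k : Nat) (hk : k < words.length) :
    (1 < words.count words[k]) ↔
      ∃ j : Nat, ∃ _ : j < words.length, j ≠ k ∧ words[j] = words[k] := by
  have hsplit : words = words.take k ++ words[k] :: words.drop (k + 1) := by
    conv_lhs => rw [← List.take_append_drop k words]
    rw [List.drop_eq_getElem_cons hk]
  generalize hw : words[k] = w at hsplit ⊢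
  have hcnt : words.count w
      = (words.take k).count w + ((words.drop (k+1)).count w + 1) := by
    conv_lhs => rw [hsplit]
    rw [List.count_append, List.count_cons_self]
  constructor
  · intro h
    rw [hcnt] at h
    have hor : 0 < (words.take k).count w ∨ 0 < (words.drop (k+1)).count w := by omega
    rcases hor with h1 | h2
    · obtain ⟨j, hj, he⟩ := List.mem_iff_getElem.mp (List.count_pos_iff.mp h1)
      rw [List.length_take] at hj
      refine ⟨j, by omega, by omega, ?_⟩
      rw [List.getElem_take] at he; exact he
    · obtain ⟨j, hj, he⟩ := List.mem_iff_getElem.mp (List.count_pos_iff.mp h2)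
      rw [List.length_drop] at hj
      rw [List.getElem_drop] at he
      exact ⟨k + 1 + j, by omega, by omega, he⟩
  · rintro ⟨j, hj, hne, he⟩
    rw [hcnt]
    have : 0 < (words.take k).count w ∨ 0 < (words.drop (k+1)).count w := by
      rcases Nat.lt_or_ge j k with hlt | hge
      · left
        refine List.count_pos_iff.mpr (List.mem_iff_getElem.mpr ⟨j, ?_, ?_⟩)
        · rw [List.length_take]; omega
        · rw [List.getElem_take]; exact he
      · right
        refine List.count_pos_iff.mpr (List.mem_iff_getElem.mpr ⟨j - (k+1), ?_, ?_⟩)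
        · rw [List.length_drop]; omega
        · rw [List.getElem_drop]
          have hidx : k + 1 + (j - (k + 1)) = j := by omega
          subst he; simp only [hidx]
    omega

-- A's inner-loop existence test equals B's count test
theorem any_eq_count (words : List String) (k : Nat) (hk : k < words.length) :
    (PySem.List.pyRange 0 (words.length : Int) 1).any
        (fun j => decide ((k : Int) ≠ j ∧ PySem.List.pyGetD words (k : Int) "" = PySem.List.pyGetD words j "")) =
      decide (1 < words.count words[k]) := by
  have hg : PySem.List.pyGetD words (k : Int) "" = words[k] := by
    rw [PySem.List.pyGetD_eq_getElem words "" (Int.natCast_nonneg k) (by exact_mod_cast hk)]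
    simp
  rw [Bool.eq_iff_iff]
  simp only [List.any_eq_true, PySem.List.mem_pyRange_one, decide_eq_true_eq]
  rw [count_iff words k hk]
  constructor
  · rintro ⟨j, ⟨hj0, hjn⟩, hne, he⟩
    refine ⟨j.toNat, by omega, by omega, ?_⟩
    rw [← hg, he, PySem.List.pyGetD_eq_getElem words "" hj0 hjn]
  · rintro ⟨j, hj, hne, he⟩
    refine ⟨(j : Int), ⟨Int.natCast_nonneg j, by exact_mod_cast hj⟩, by exact_mod_cast Ne.symm hne, ?_⟩
    rw [hg, PySem.List.pyGetD_eq_getElem words "" (Int.natCast_nonneg j) (by exact_mod_cast hj)]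
    simp [he]

def stepA (words : List String) (d : PySem.Dict String Int) (i : Int) : PySem.Dict String Int :=
  if PySem.Dict.contains d (PySem.List.pyGetD words i "") = true then d
  else
    if (PySem.List.pyRange 0 (words.length : Int) 1).any (fun j =>
          decide (i ≠ j ∧ PySem.List.pyGetD words i "" = PySem.List.pyGetD words j "")) then
      PySem.Dict.insert d (PySem.List.pyGetD words i "") i
    else d

def stepB (words : List String) (st : PySem.Set String × List Int) (i : Int) :
    PySem.Set String × List Int :=
  if ((words.count (PySem.List.pyGetD words i "") : Int) > 1 ∧
        ¬ (PySem.Set.contains st.1 (PySem.List.pyGetD words i "") = true)) then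
    (PySem.Set.add st.1 (PySem.List.pyGetD words i ""), st.2 ++ [i])
  else st

theorem step_lemma (words : List String) (d : PySem.Dict String Int)
    (st : PySem.Set String × List Int) (x : Int)
    (hx : x ∈ PySem.List.pyRange 0 (words.length : Int) 1)
    (hr : PySem.Dict.keys d = st.1 ∧ PySem.Dict.values d = st.2) :
    PySem.Dict.keys (stepA words d x) = (stepB words st x).1 ∧
      PySem.Dict.values (stepA words d x) = (stepB words st x).2 := by
  obtain ⟨h1, h2⟩ := hr
  rw [PySem.List.mem_pyRange_one] at hx
  obtain ⟨k, rfl⟩ : ∃ k : Nat, x = (k : Int) := ⟨x.toNat, by omega⟩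
  have hk : k < words.length := by exact_mod_cast hx.2
  have hg : PySem.List.pyGetD words (k : Int) "" = words[k] := by
    rw [PySem.List.pyGetD_eq_getElem words "" (Int.natCast_nonneg k) (by exact_mod_cast hk)]
    simp
  unfold stepA stepB
  simp only [any_eq_count words k hk]
  simp only [hg, decide_eq_true_eq]
  by_cases hmem : words[k] ∈ PySem.Dict.keys d
  · have hcd : PySem.Dict.contains d words[k] = true :=
      (PySem.Dict.contains_iff_mem_keys _ _).mpr hmem
    have hcs : PySem.Set.contains st.1 words[k] = true :=
      (PySem.Set.contains_iff _ _).mpr (h1 ▸ hmem)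
    rw [if_pos hcd, if_neg (by rintro ⟨-, hn⟩; exact hn hcs)]
    exact ⟨h1, h2⟩
  · have hcd : PySem.Dict.contains d words[k] = false :=
      Bool.eq_false_iff.mpr (fun h => hmem ((PySem.Dict.contains_iff_mem_keys _ _).mp h))
    have hcs : PySem.Set.contains st.1 words[k] = false :=
      Bool.eq_false_iff.mpr (fun h => hmem (h1 ▸ (PySem.Set.contains_iff _ _).mp h))
    rw [if_neg (by simp [hcd])]
    by_cases hcnt : 1 < words.count words[k]
    · rw [if_pos hcnt, if_pos ⟨by exact_mod_cast hcnt, by rw [hcs]; simp⟩]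
      constructor
      · rw [PySem.Dict.keys_insert_of_not_contains d _ hcd]
        simp only [PySem.Set.add, hcs]
        rw [h1]
        simp
      · simp only [PySem.Dict.values, PySem.Dict.items_insert_of_not_contains d _ hcd,
          List.map_append]
        simp only [PySem.Dict.values] at h2
        simp [h2]
    · rw [if_neg hcnt, if_neg (by rintro ⟨hc, -⟩; exact hcnt (by exact_mod_cast hc))]
      exact ⟨h1, h2⟩

-- generic two-fold simulation
theorem foldl_sim {α β γ : Type} (R : α → β → Prop) (l : List γ)
    (fA : α → γ → α) (fB : β → γ → β)
    (h : ∀ a b x, x ∈ l → R a b → R (fA a x) (fB b x)) :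
    ∀ a b, R a b → R (l.foldl fA a) (l.foldl fB b) := by
  induction l with
  | nil => intro a b hr; exact hr
  | cons x xs ih =>
    intro a b hr
    exact ih (fun a b y hy => h a b y (List.mem_cons_of_mem _ hy)) _ _
      (h a b x (List.mem_cons_self ..) hr)

-- ===== VERDICT (by name: the statement is the Claim_ definition above) =====
theorem get_duplicate_indices_spec : Claim_equal_get_duplicate_indices := by
  intro words _
  unfold Spec_get_duplicate_indices
  simp only [get_duplicate_indices, get_duplicate_indices_alt,
    innerA, PySem.List.enumerate_eq_map_pyRange words "", List.foldl_map, PySem.List.len_eq]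
  simp only [PySem.Dict.foldl_insert_getD_add_one_eq_counter, PySem.Dict.getD_counter]
  show (List.foldl (stepA words) PySem.Dict.empty (PySem.List.pyRange 0 (words.length : Int) 1)).values
      = (List.foldl (stepB words) (PySem.Set.empty, ([] : List Int)) (PySem.List.pyRange 0 (words.length : Int) 1)).2
  exact (foldl_sim
    (fun d st => PySem.Dict.keys d = st.1 ∧ PySem.Dict.values d = st.2)
    (PySem.List.pyRange 0 (words.length : Int) 1) (stepA words) (stepB words)
    (fun d st x hx hr => step_lemma words d st x hx hr)
    PySem.Dict.empty (PySem.Set.empty, []) ⟨by decide, by decide⟩).2
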